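-- pv_equiv track=rewrite | github.com/uncom1c/aip-project-2023 | notebook.py | attack_rashivrovka
-- ===== SOURCE A (Python) =====
-- def attack_rashivrovka(stroka, key):
--     '''
--     Функция работает почти так же, как и decoder, за исключением проверки на "легитимность"
--     Потому что невозможно существовать num_letter<128 или >256
--     '''
--     decoded_stroka = ''
--     for i in range(len(key)):
--         if key[i] == stroka[i]:
--             decoded_stroka += '0'
--         else:
--             decoded_stroka += '1'
--     decoded_letters = ''
--     for i in range(len(decoded_stroka)//8):
--         temp_stroka = ''
--         for j in range(8):
--             temp_stroka += decoded_stroka[8*i+j]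
--         num_letter = 0
--         for j in range(len(temp_stroka)):
--             if temp_stroka[j] == '1':
--                 num_letter += 2**(7-j)
--         if num_letter > 128 and num_letter < 256:
--
--             decoded_letters += chr(num_letter - 128)
--
--     return (decoded_letters)
-- ===== SOURCE B (Python) =====
-- def attack_rashivrovka(stroka, key):
--     out = []
--     acc = 0
--     for i in range(len(key)):
--         acc = acc * 2 + (0 if key[i] == stroka[i] else 1)
--         if i % 8 == 7:
--             if 128 < acc < 256:
--                 out.append(chr(acc - 128))
--             acc = 0
--     return ''.join(out)
-- ===== Notes on version B (the rewrite author's own statement) =====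
-- stated objective: simpler
-- what changed: Fuses A's three phases (bit-string build, 8-char chunk re-scan, power-of-two summation) into one pass that accumulates each byte MSB-first in a running integer, emitting a character whenever 8 bits complete.
import Mathlib
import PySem

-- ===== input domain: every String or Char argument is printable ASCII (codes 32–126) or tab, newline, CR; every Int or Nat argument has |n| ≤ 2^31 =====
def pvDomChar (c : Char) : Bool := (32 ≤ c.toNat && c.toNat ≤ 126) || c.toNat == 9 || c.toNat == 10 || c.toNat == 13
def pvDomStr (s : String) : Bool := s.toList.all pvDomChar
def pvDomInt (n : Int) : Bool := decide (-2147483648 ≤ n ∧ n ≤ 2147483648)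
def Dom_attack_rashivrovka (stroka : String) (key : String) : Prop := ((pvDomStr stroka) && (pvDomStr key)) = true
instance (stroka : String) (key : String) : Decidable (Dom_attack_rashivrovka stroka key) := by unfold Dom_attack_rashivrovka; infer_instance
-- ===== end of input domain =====

-- B fuses A's three phases (bit-string build, 8-char chunk re-scan, power-of-two summation) into one accumulator pass; the objective is a simpler single-loop decomposition.

-- ===== PORT A =====
def attack_rashivrovka (stroka : String) (key : String) : String :=
  let s := stroka.toList
  let k := key.toList
  -- first loop: build the '0'/'1' bit string (the index into stroka is in range on Pre_)
  let decoded : List Char := (List.range k.length).foldl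
    (fun acc i => acc ++ [if k.getD i ' ' = s.getD i ' ' then '0' else '1']) []
  -- second loop: per 8-char chunk build temp, sum powers of two, filter, append chr
  let letters : List Char := (List.range (decoded.length / 8)).foldl
    (fun acc i =>
      let temp : List Char := (List.range 8).foldl
        (fun t j => t ++ [decoded.getD (8 * i + j) ' ']) []
      let num : Nat := (List.range temp.length).foldl
        (fun m j => if temp.getD j ' ' = '1' then m + 2 ^ (7 - j) else m) 0
      if 128 < num ∧ num < 256 then acc ++ [Char.ofNat (num - 128)] else acc) []
  String.ofList letters

-- ===== PORT B =====
def attack_rashivrovka_alt (stroka : String) (key : String) : String :=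
  let s := stroka.toList
  let k := key.toList
  let st : List Char × Nat := (List.range k.length).foldl
    (fun (st : List Char × Nat) i =>
      let acc := st.2 * 2 + (if k.getD i ' ' = s.getD i ' ' then 0 else 1)
      if i % 8 = 7 then
        (if 128 < acc ∧ acc < 256 then st.1 ++ [Char.ofNat (acc - 128)] else st.1, 0)
      else (st.1, acc)) ([], 0)
  String.ofList st.1

-- ===== PRECONDITION & SPEC =====
-- Pre_: Python A raises IndexError (stroka[i]) when stroka is shorter than key; exactly those inputs are excluded (B raises there too).
def Pre_attack_rashivrovka (stroka : String) (key : String) : Prop :=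
  key.toList.length ≤ stroka.toList.length
instance (stroka : String) (key : String) : Decidable (Pre_attack_rashivrovka stroka key) := by unfold Pre_attack_rashivrovka; infer_instance

def pvWitness_attack_rashivrovka : String × String := ("HelloWorld!", "ab~cdef gh")

def Spec_attack_rashivrovka (stroka : String) (key : String) (out : String) : Prop := out = attack_rashivrovka_alt stroka key
instance (stroka : String) (key : String) (out : String) : Decidable (Spec_attack_rashivrovka stroka key out) := by unfold Spec_attack_rashivrovka; infer_instance

-- ===== CLAIM (what is proved, stated in full; the proofs are below) =====
def Claim_equal_attack_rashivrovka : Prop := ∀ (stroka : String) (key : String), Dom_attack_rashivrovka stroka key → Pre_attack_rashivrovka stroka key → Spec_attack_rashivrovka stroka key (attack_rashivrovka stroka key)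

-- ===== LEMMAS AND PROOFS =====

-- abstract forms of the two loops over a bit-valued function f : index → Char
def pvStep (f : Nat → Char) (st : List Char × Nat) (i : Nat) : List Char × Nat :=
  let acc := st.2 * 2 + (if f i = '1' then 1 else 0)
  if i % 8 = 7 then
    (if 128 < acc ∧ acc < 256 then st.1 ++ [Char.ofNat (acc - 128)] else st.1, 0)
  else (st.1, acc)

def pvBfold (f : Nat → Char) (n : Nat) : List Char × Nat :=
  (List.range n).foldl (pvStep f) ([], 0)

def pvNum (f : Nat → Char) (q : Nat) : Nat :=
  (List.range 8).foldl (fun m j => if f (8 * q + j) = '1' then m + 2 ^ (7 - j) else m) 0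

def pvAout (f : Nat → Char) (q : Nat) : List Char :=
  (List.range q).foldl
    (fun acc i => if 128 < pvNum f i ∧ pvNum f i < 256 then acc ++ [Char.ofNat (pvNum f i - 128)] else acc) []

def pvAcc (f : Nat → Char) (q r : Nat) : Nat :=
  (List.range r).foldl (fun a j => a * 2 + (if f (8 * q + j) = '1' then 1 else 0)) 0

lemma pvAcc_succ (f : Nat → Char) (q r : Nat) :
    pvAcc f q (r + 1) = pvAcc f q r * 2 + (if f (8 * q + r) = '1' then 1 else 0) := by
  simp [pvAcc, List.range_succ]

lemma pvNum_partial (f : Nat → Char) (q : Nat) (r : Nat) (hr : r ≤ 8) :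
    (List.range r).foldl (fun m j => if f (8 * q + j) = '1' then m + 2 ^ (7 - j) else m) 0
      = pvAcc f q r * 2 ^ (8 - r) := by
  induction r with
  | zero => simp [pvAcc]
  | succ r ih =>
    rw [List.range_succ, List.foldl_append, List.foldl_cons, List.foldl_nil,
      ih (by omega), pvAcc_succ]
    have e1 : 8 - r = (7 - r) + 1 := by omega
    have e2 : 8 - (r + 1) = 7 - r := by omega
    rw [e1, e2, pow_succ]
    split_ifs <;> ring

lemma pvAcc_eight (f : Nat → Char) (q : Nat) : pvAcc f q 8 = pvNum f q := by
  have := pvNum_partial f q 8 (by omega)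
  simpa [pvNum] using this.symm

-- B's pass computes A's per-block letters plus the running accumulator of the open block
lemma pvBfold_main (f : Nat → Char) (n : Nat) :
    pvBfold f n = (pvAout f (n / 8), pvAcc f (n / 8) (n % 8)) := by
  induction n with
  | zero => rfl
  | succ n ih =>
    have hstep : pvBfold f (n + 1) = pvStep f (pvBfold f n) n := by
      rw [pvBfold, pvBfold, List.range_succ, List.foldl_append, List.foldl_cons, List.foldl_nil]
    rw [hstep, ih]
    by_cases h7 : n % 8 = 7
    · have hq : (n + 1) / 8 = n / 8 + 1 := by omega
      have hr : (n + 1) % 8 = 0 := by omega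
      have h1 := pvAcc_succ f (n / 8) 7
      rw [show 8 * (n / 8) + 7 = n by omega] at h1
      have hacc : pvAcc f (n / 8) 7 * 2 + (if f n = '1' then 1 else 0) = pvNum f (n / 8) := by
        rw [← h1]; exact pvAcc_eight f (n / 8)
      rw [pvStep]
      simp only [h7, if_pos]
      rw [hq, hr, hacc]
      have hout : pvAout f (n / 8 + 1)
          = if 128 < pvNum f (n / 8) ∧ pvNum f (n / 8) < 256
            then pvAout f (n / 8) ++ [Char.ofNat (pvNum f (n / 8) - 128)] else pvAout f (n / 8) := by
        rw [pvAout, List.range_succ, List.foldl_append, List.foldl_cons, List.foldl_nil, ← pvAout]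
      rw [hout]
      rfl
    · have hq : (n + 1) / 8 = n / 8 := by omega
      have hr : (n + 1) % 8 = n % 8 + 1 := by omega
      rw [pvStep]
      simp only [if_neg h7]
      rw [hq, hr, pvAcc_succ, show 8 * (n / 8) + n % 8 = n by omega]

theorem attack_rashivrovka_spec : Claim_equal_attack_rashivrovka := by
  intro stroka key _ _
  show attack_rashivrovka stroka key = attack_rashivrovka_alt stroka key
  simp only [attack_rashivrovka, attack_rashivrovka_alt,
    PySem.List.foldl_append_singleton_eq_map, List.nil_append, List.length_map,
    List.length_range]
  set s := stroka.toList with hs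
  set k := key.toList with hk
  set g : Nat → Char := fun i => if k.getD i ' ' = s.getD i ' ' then '0' else '1' with hg
  set F : Nat → Char := fun m => ((List.range k.length).map g).getD m ' ' with hF
  have hB : (List.range k.length).foldl
      (fun (st : List Char × Nat) i =>
        let acc := st.2 * 2 + (if k.getD i ' ' = s.getD i ' ' then 0 else 1)
        if i % 8 = 7 then
          (if 128 < acc ∧ acc < 256 then st.1 ++ [Char.ofNat (acc - 128)] else st.1, 0)
        else (st.1, acc)) ([], 0)
      = pvBfold F k.length := by
    rw [pvBfold]
    apply PySem.List.foldl_congr_mem'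
    intro i hi st
    rw [List.mem_range] at hi
    have hFi : F i = g i := by
      rw [hF]
      simp [hi]
    rw [pvStep, hFi, hg]
    by_cases hc : k.getD i ' ' = s.getD i ' ' <;> simp [hc]
  have hA : (List.range (k.length / 8)).foldl
      (fun acc i =>
        let temp : List Char := (List.range 8).map
          (fun j => ((List.range k.length).map g).getD (8 * i + j) ' ')
        let num : Nat := (List.range 8).foldl
          (fun m j => if temp.getD j ' ' = '1' then m + 2 ^ (7 - j) else m) 0
        if 128 < num ∧ num < 256 then acc ++ [Char.ofNat (num - 128)] else acc) []
      = pvAout F (k.length / 8) := by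
    rw [pvAout]
    apply PySem.List.foldl_congr_mem'
    intro i _ acc
    have hnum : (List.range 8).foldl
        (fun m j => if ((List.range 8).map
            (fun j => ((List.range k.length).map g).getD (8 * i + j) ' ')).getD j ' ' = '1'
          then m + 2 ^ (7 - j) else m) 0 = pvNum F i := by
      rw [pvNum]
      apply PySem.List.foldl_congr_mem'
      intro j hj m
      rw [List.mem_range] at hj
      have : ((List.range 8).map
          (fun j => ((List.range k.length).map g).getD (8 * i + j) ' ')).getD j ' '
          = F (8 * i + j) := by
        rw [hF]
        simp [hj]
      rw [this]
    simp only [hnum]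
  simp only [hA, hB, pvBfold_main]
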